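-- pv_equiv track=rewrite | github.com/sadiela/voiceleading-rl | voice_leading_rules.py | illegal_common_tones
-- ===== SOURCE A (Python) =====
-- def illegal_common_tones(state, next_state):
--     # return true if there are three illegal common tones or 4 common tones
--     num_common_tones = 0
--     for i in range(4):
--         if state[i] == next_state[i]:
--             num_common_tones += 1
--     if num_common_tones == 3:
--         if state[0] == next_state[0]:
--             return 1
--         else:
--             return 0 # bass arpeggiation!
--     elif num_common_tones == 4:
--         return 1
--     return 0
-- ===== SOURCE B (Python) =====
-- # Illegal masks (bit i set = voices at index i agree): all four agree, or
-- # bass agrees together with any two of the upper three voices.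
-- _ILLEGAL_MASKS = (0b0111, 0b1011, 0b1101, 0b1111)
--
-- def illegal_common_tones(state, next_state):
--     mask = ((state[0] == next_state[0])
--             | (state[1] == next_state[1]) << 1
--             | (state[2] == next_state[2]) << 2
--             | (state[3] == next_state[3]) << 3)
--     return 1 if mask in _ILLEGAL_MASKS else 0
-- ===== Notes on version B (the rewrite author's own statement) =====
-- stated objective: alternative
-- what changed: B replaces A's match-counting loop and branch cascade with a loop-free 4-bit agreement mask looked up in a precomputed table of the four illegal masks.
import Mathlib
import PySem

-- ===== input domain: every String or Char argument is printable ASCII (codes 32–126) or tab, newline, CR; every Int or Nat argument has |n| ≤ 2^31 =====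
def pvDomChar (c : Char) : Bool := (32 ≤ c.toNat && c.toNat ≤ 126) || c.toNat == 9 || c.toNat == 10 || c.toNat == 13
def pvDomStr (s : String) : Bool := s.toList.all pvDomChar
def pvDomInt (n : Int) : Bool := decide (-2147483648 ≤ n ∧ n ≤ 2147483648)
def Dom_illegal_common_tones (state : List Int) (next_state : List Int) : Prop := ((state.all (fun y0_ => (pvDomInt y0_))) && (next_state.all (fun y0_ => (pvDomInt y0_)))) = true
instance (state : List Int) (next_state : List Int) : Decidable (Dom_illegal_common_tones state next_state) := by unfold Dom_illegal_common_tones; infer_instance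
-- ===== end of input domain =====

-- B replaces A's match-counting loop and branch cascade with a loop-free 4-bit
-- agreement mask looked up in a table of the four illegal masks.

-- ===== PORT A =====
-- literal port of A: count matches over range(4), then the branch cascade.
-- state[i] is ported as pyGetD _ i 0; under Pre_ (lengths ≥ 4) every access is in
-- range, exactly where Python returns without IndexError.
def illegal_common_tones (state : List Int) (next_state : List Int) : Int :=
  let num_common_tones : Int :=
    (PySem.List.pyRange 0 4 1).foldl
      (fun n i =>
        if PySem.List.pyGetD state i 0 = PySem.List.pyGetD next_state i 0 then n + 1 else n) 0
  if num_common_tones = 3 then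
    if PySem.List.pyGetD state 0 0 = PySem.List.pyGetD next_state 0 0 then 1 else 0
  else if num_common_tones = 4 then 1
  else 0

-- ===== PORT B =====
-- bool-to-int shifts ported as (if … then 1 else 0) <<< k; Python's `|` on these
-- disjoint one-bit values is Int.lor (|||); tuple membership is the or-chain.
def illegal_common_tones_alt (state : List Int) (next_state : List Int) : Int :=
  let mask : Int :=
    (if PySem.List.pyGetD state 0 0 = PySem.List.pyGetD next_state 0 0 then 1 else 0)
    ||| ((if PySem.List.pyGetD state 1 0 = PySem.List.pyGetD next_state 1 0 then 1 else 0) <<< 1)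
    ||| ((if PySem.List.pyGetD state 2 0 = PySem.List.pyGetD next_state 2 0 then 1 else 0) <<< 2)
    ||| ((if PySem.List.pyGetD state 3 0 = PySem.List.pyGetD next_state 3 0 then 1 else 0) <<< 3)
  if mask = 7 ∨ mask = 11 ∨ mask = 13 ∨ mask = 15 then 1 else 0

-- ===== PRECONDITION & SPEC =====
-- Pre_ excludes exactly the inputs where Python A raises IndexError (a voicing has fewer than 4 voices).
def Pre_illegal_common_tones (state : List Int) (next_state : List Int) : Prop :=
  4 ≤ state.length ∧ 4 ≤ next_state.length
instance (state : List Int) (next_state : List Int) : Decidable (Pre_illegal_common_tones state next_state) := by unfold Pre_illegal_common_tones; infer_instance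
def pvWitness_illegal_common_tones : List Int × List Int := ([60, 64, 67, 72], [60, 64, 67, 72])

def Spec_illegal_common_tones (state : List Int) (next_state : List Int) (out : Int) : Prop := out = illegal_common_tones_alt state next_state
instance (state : List Int) (next_state : List Int) (out : Int) : Decidable (Spec_illegal_common_tones state next_state out) := by unfold Spec_illegal_common_tones; infer_instance

-- ===== CLAIM (what is proved, stated in full; the proofs are below) =====
def Claim_equal_illegal_common_tones : Prop := ∀ (state : List Int) (next_state : List Int), Dom_illegal_common_tones state next_state → Pre_illegal_common_tones state next_state → Spec_illegal_common_tones state next_state (illegal_common_tones state next_state)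

-- ===== LEMMAS AND PROOFS =====

-- ===== VERDICT (by name: the statement is the Claim_ definition above) =====
theorem illegal_common_tones_spec : Claim_equal_illegal_common_tones := by
  intro state next_state _ hpre
  obtain ⟨hs, ht⟩ := hpre
  match state, next_state with
  | a :: b :: c :: d :: _, e :: f :: g :: h :: _ =>
    have hr : PySem.List.pyRange 0 4 1 = [0, 1, 2, 3] := by decide
    simp only [Spec_illegal_common_tones, illegal_common_tones, illegal_common_tones_alt, hr,
      List.foldl, PySem.List.pyGetD_ofNat', List.getD]
    norm_num
    by_cases h1 : a = e <;> by_cases h2 : b = f <;> by_cases h3 : c = g <;>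
      by_cases h4 : d = h <;> simp [h1, h2, h3, h4]
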